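-- pv_equiv track=rewrite | github.com/Elie224/agrox | recommendations.py | assess_issue_severity
-- ===== SOURCE A (Python) =====
-- def assess_issue_severity(reasons):
--     rank = {"faible": 0, "modere": 1, "important": 2, "critique": 3}
--     detected = "faible"
--     alerte = "Aucune alerte majeure"
--
--     for reason in reasons:
--         text = str(reason).lower()
--         sev = "faible"
--         if "stress hydrique" in text or "deficit hydrique" in text:
--             sev = "modere"
--         if "exces d'eau" in text or "engorgement" in text:
--             sev = "modere"
--         if "trop eleve" in text or "desequilibre" in text or "salinite" in text:
--             sev = "important"
--         if "insuffisant" in text or "faible" in text or "carence" in text or "hydromorphe" in text or "salin" in text: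
--             sev = "critique"
--
--         if rank[sev] >= rank[detected]:
--             detected = sev
--             alerte = reason
--
--     return detected, alerte
-- ===== SOURCE B (Python) =====
-- NAMES = ("faible", "modere", "important", "critique")
-- RULES = (
--     (3, ("insuffisant", "faible", "carence", "hydromorphe", "salin")),
--     (2, ("trop eleve", "desequilibre", "salinite")),
--     (1, ("stress hydrique", "deficit hydrique", "exces d'eau", "engorgement")),
-- )
--
-- def assess_issue_severity(reasons):
--     if not reasons:
--         return "faible", "Aucune alerte majeure"
--     def grade(reason):
--         text = str(reason).lower()
--         return next((g for g, pats in RULES if any(p in text for p in pats)), 0)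
--     graded = [(grade(r), r) for r in reasons]
--     best = max(g for g, _ in graded)
--     alerte = [r for g, r in graded if g == best][-1]
--     return NAMES[best], alerte
-- ===== Notes on version B (the rewrite author's own statement) =====
-- stated objective: idiomatic
-- what changed: Replaces the cascading if-reassignment and running (detected, alerte) accumulator with a declarative rule table searched once per reason, then a separate max/last-match reduction over the graded list.
import Mathlib
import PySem

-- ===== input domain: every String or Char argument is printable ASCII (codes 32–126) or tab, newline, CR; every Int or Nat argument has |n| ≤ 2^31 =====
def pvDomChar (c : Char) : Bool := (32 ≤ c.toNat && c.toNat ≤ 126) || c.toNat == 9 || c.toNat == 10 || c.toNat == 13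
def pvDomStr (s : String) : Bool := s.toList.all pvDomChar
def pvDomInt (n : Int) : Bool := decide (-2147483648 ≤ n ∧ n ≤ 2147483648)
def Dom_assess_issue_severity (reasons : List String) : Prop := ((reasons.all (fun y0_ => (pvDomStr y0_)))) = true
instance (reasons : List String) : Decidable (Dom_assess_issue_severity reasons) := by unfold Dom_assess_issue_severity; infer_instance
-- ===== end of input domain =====

-- B replaces A's cascading if-reassignments and running (detected, alerte) state with a
-- declarative rule table searched once per reason, then a separate max / last-match reduction (objective: idiomatic).

-- ===== PORT A =====
def pvRankA : PySem.Dict String Int :=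
  PySem.Dict.ofList [("faible", 0), ("modere", 1), ("important", 2), ("critique", 3)]

-- the cascading reassignments of `sev` in A's loop body
def pvSevA (text : String) : String :=
  let sev := "faible"
  let sev := if PySem.Str.isIn "stress hydrique" text || PySem.Str.isIn "deficit hydrique" text then "modere" else sev
  let sev := if PySem.Str.isIn "exces d'eau" text || PySem.Str.isIn "engorgement" text then "modere" else sev
  let sev := if PySem.Str.isIn "trop eleve" text || PySem.Str.isIn "desequilibre" text || PySem.Str.isIn "salinite" text then "important" else sev
  let sev := if PySem.Str.isIn "insuffisant" text || PySem.Str.isIn "faible" text || PySem.Str.isIn "carence" text || PySem.Str.isIn "hydromorphe" text || PySem.Str.isIn "salin" text then "critique" else sev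
  sev

-- one iteration of A's for-loop, state = (detected, alerte); rank[…] keys are always present, getD's default is never used
def pvStepA (st : String × String) (reason : String) : String × String :=
  let text := PySem.Str.lower reason
  let sev := pvSevA text
  if pvRankA.getD sev 0 ≥ pvRankA.getD st.1 0 then (sev, reason) else st

def assess_issue_severity (reasons : List String) : String × String :=
  reasons.foldl pvStepA ("faible", "Aucune alerte majeure")

-- ===== PORT B =====
def pvNames : List String := ["faible", "modere", "important", "critique"]

def pvRules : List (Nat × List String) :=
  [(3, ["insuffisant", "faible", "carence", "hydromorphe", "salin"]),
   (2, ["trop eleve", "desequilibre", "salinite"]),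
   (1, ["stress hydrique", "deficit hydrique", "exces d'eau", "engorgement"])]

-- Source B's `grade`: first rule one of whose patterns occurs in the lowered text, default 0
def pvGrade (reason : String) : Nat :=
  let text := PySem.Str.lower reason
  match pvRules.find? (fun rp => rp.2.any (fun p => PySem.Str.isIn p text)) with
  | some rp => rp.1
  | none => 0

def assess_issue_severity_alt (reasons : List String) : String × String :=
  if reasons.isEmpty then ("faible", "Aucune alerte majeure")
  else
    let graded := reasons.map (fun r => (pvGrade r, r))
    let best := (graded.map Prod.fst).foldl max 0
    let alerte := (((graded.filter (fun gr => gr.1 == best)).map Prod.snd).getLast?).getD ""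
    (pvNames.getD best "faible", alerte)

-- ===== PRECONDITION & SPEC =====
def Spec_assess_issue_severity (reasons : List String) (out : String × String) : Prop := out = assess_issue_severity_alt reasons
instance (reasons : List String) (out : String × String) : Decidable (Spec_assess_issue_severity reasons out) := by unfold Spec_assess_issue_severity; infer_instance

-- ===== CLAIM (what is proved, stated in full; the proofs are below) =====
def Claim_equal_assess_issue_severity : Prop := ∀ (reasons : List String), Dom_assess_issue_severity reasons → Spec_assess_issue_severity reasons (assess_issue_severity reasons)

-- ===== LEMMAS AND PROOFS =====

-- the four block conditions of A's cascade
def cM1 (t : String) : Bool := PySem.Str.isIn "stress hydrique" t || PySem.Str.isIn "deficit hydrique" t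
def cM2 (t : String) : Bool := PySem.Str.isIn "exces d'eau" t || PySem.Str.isIn "engorgement" t
def cI (t : String) : Bool := PySem.Str.isIn "trop eleve" t || PySem.Str.isIn "desequilibre" t || PySem.Str.isIn "salinite" t
def cC (t : String) : Bool := PySem.Str.isIn "insuffisant" t || PySem.Str.isIn "faible" t || PySem.Str.isIn "carence" t || PySem.Str.isIn "hydromorphe" t || PySem.Str.isIn "salin" t

def gradeIf (t : String) : Nat := if cC t then 3 else if cI t then 2 else if cM1 t || cM2 t then 1 else 0

def nm (g : Nat) : String := pvNames.getD g "faible"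

lemma grade_eq (r : String) : pvGrade r = gradeIf (PySem.Str.lower r) := by
  simp only [pvGrade, pvRules, gradeIf]
  cases hC : cC (PySem.Str.lower r)
  · cases hI : cI (PySem.Str.lower r)
    · cases hM : cM1 (PySem.Str.lower r) || cM2 (PySem.Str.lower r)
      · rw [List.find?_cons_of_neg (by
              simp only [List.any_cons, List.any_nil, Bool.or_false, Bool.or_assoc, cC] at hC ⊢
              intro hx; rw [hx] at hC; exact Bool.noConfusion hC),
            List.find?_cons_of_neg (by
              simp only [List.any_cons, List.any_nil, Bool.or_false, Bool.or_assoc, cI] at hI ⊢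
              intro hx; rw [hx] at hI; exact Bool.noConfusion hI),
            List.find?_cons_of_neg (by
              simp only [List.any_cons, List.any_nil, Bool.or_false, Bool.or_assoc, cM1, cM2] at hM ⊢
              intro hx; rw [hx] at hM; exact Bool.noConfusion hM)]
        simp [hC, hI, hM]
      · rw [List.find?_cons_of_neg (by
              simp only [List.any_cons, List.any_nil, Bool.or_false, Bool.or_assoc, cC] at hC ⊢
              intro hx; rw [hx] at hC; exact Bool.noConfusion hC),
            List.find?_cons_of_neg (by
              simp only [List.any_cons, List.any_nil, Bool.or_false, Bool.or_assoc, cI] at hI ⊢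
              intro hx; rw [hx] at hI; exact Bool.noConfusion hI),
            List.find?_cons_of_pos (by
              simp only [List.any_cons, List.any_nil, Bool.or_false, Bool.or_assoc, cM1, cM2] at hM ⊢
              exact hM)]
        simp [hC, hI, hM]
    · rw [List.find?_cons_of_neg (by
            simp only [List.any_cons, List.any_nil, Bool.or_false, Bool.or_assoc, cC] at hC ⊢
            intro hx; rw [hx] at hC; exact Bool.noConfusion hC),
          List.find?_cons_of_pos (by
            simp only [List.any_cons, List.any_nil, Bool.or_false, Bool.or_assoc, cI] at hI ⊢
            exact hI)]
      simp [hC, hI]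
  · rw [List.find?_cons_of_pos (by
          simp only [List.any_cons, List.any_nil, Bool.or_false, Bool.or_assoc, cC] at hC ⊢
          exact hC)]
    simp [hC]

lemma grade_le (r : String) : pvGrade r ≤ 3 := by
  rw [grade_eq]; unfold gradeIf; split_ifs <;> omega

lemma rank_nm (g : Nat) (h : g ≤ 3) : pvRankA.getD (nm g) 0 = (g : Int) := by
  interval_cases g <;> decide

lemma sevA_eq (t : String) : pvSevA t = nm (gradeIf t) := by
  simp only [pvSevA, gradeIf, cC, cI, cM1, cM2, nm, pvNames, Bool.or_assoc]
  split_ifs <;> simp_all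

lemma stepA_eq (d : Nat) (hd : d ≤ 3) (a reason : String) :
    pvStepA (nm d, a) reason =
      if d ≤ pvGrade reason then (nm (pvGrade reason), reason) else (nm d, a) := by
  have hg : pvGrade reason ≤ 3 := grade_le reason
  simp only [pvStepA]
  rw [sevA_eq, ← grade_eq, rank_nm _ hg, rank_nm _ hd]
  by_cases h : d ≤ pvGrade reason
  · rw [if_pos (by exact_mod_cast h), if_pos h]
  · rw [if_neg (by intro hc; exact h (by exact_mod_cast hc)), if_neg h]

def runM (d : Nat) (rs : List String) : Nat := rs.foldl (fun m r => max m (pvGrade r)) d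
def runL (m : Nat) (a : String) (rs : List String) : String :=
  rs.foldl (fun acc r => if pvGrade r = m then r else acc) a

lemma runM_init_le : ∀ (rs : List String) (d : Nat), d ≤ runM d rs := by
  intro rs
  induction rs with
  | nil => intro d; exact le_rfl
  | cons r t ih => intro d; exact le_trans (le_max_left _ _) (ih (max d (pvGrade r)))

lemma runM_mem_le : ∀ (rs : List String) (d : Nat), ∀ x ∈ rs, pvGrade x ≤ runM d rs := by
  intro rs
  induction rs with
  | nil => intro d x hx; cases hx
  | cons r t ih =>
      intro d x hx
      rcases List.mem_cons.mp hx with rfl | hx'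
      · exact le_trans (le_max_right d (pvGrade x)) (runM_init_le t _)
      · exact ih _ x hx'

lemma runM_attained : ∀ (rs : List String) (d : Nat),
    runM d rs = d ∨ ∃ x ∈ rs, pvGrade x = runM d rs := by
  intro rs
  induction rs with
  | nil => intro d; left; rfl
  | cons r t ih =>
      intro d
      have hM : runM d (r :: t) = runM (max d (pvGrade r)) t := rfl
      rcases ih (max d (pvGrade r)) with h | ⟨x, hx, hgx⟩
      · by_cases hgd : d ≤ pvGrade r
        · right
          exact ⟨r, List.mem_cons_self, by rw [hM, h, Nat.max_eq_right hgd]⟩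
        · left
          rw [hM, h, Nat.max_eq_left (Nat.le_of_not_le hgd)]
      · right
        exact ⟨x, List.mem_cons_of_mem _ hx, hgx⟩

lemma runL_irrel : ∀ (rs : List String) (m : Nat) (a b : String),
    (∃ x ∈ rs, pvGrade x = m) → runL m a rs = runL m b rs := by
  intro rs
  induction rs with
  | nil => rintro m a b ⟨x, hx, -⟩; cases hx
  | cons r t ih =>
      rintro m a b ⟨x, hx, hgx⟩
      show runL m (if pvGrade r = m then r else a) t = runL m (if pvGrade r = m then r else b) t
      by_cases h : pvGrade r = m
      · rw [if_pos h, if_pos h]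
      · rw [if_neg h, if_neg h]
        rcases List.mem_cons.mp hx with rfl | hx'
        · exact absurd hgx h
        · exact ih m a b ⟨x, hx', hgx⟩

lemma runL_nomatch : ∀ (rs : List String) (m : Nat) (a : String),
    (∀ x ∈ rs, pvGrade x ≠ m) → runL m a rs = a := by
  intro rs
  induction rs with
  | nil => intro m a _; rfl
  | cons r t ih =>
      intro m a h
      show runL m (if pvGrade r = m then r else a) t = a
      rw [if_neg (h r List.mem_cons_self)]
      exact ih m a (fun x hx => h x (List.mem_cons_of_mem _ hx))

lemma foldA_char : ∀ (rs : List String) (d : Nat) (a : String), d ≤ 3 →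
    rs.foldl pvStepA (nm d, a) = (nm (runM d rs), runL (runM d rs) a rs) := by
  intro rs
  induction rs with
  | nil => intro d a hd; rfl
  | cons r t ih =>
      intro d a hd
      have hM : runM d (r :: t) = runM (max d (pvGrade r)) t := by
        simp only [runM, List.foldl_cons]
      have hL : runL (runM d (r :: t)) a (r :: t)
          = runL (runM d (r :: t)) (if pvGrade r = runM d (r :: t) then r else a) t := by
        simp only [runL, List.foldl_cons]
      rw [List.foldl_cons, stepA_eq d hd a r, hL, hM]
      by_cases hgd : d ≤ pvGrade r
      · rw [if_pos hgd]
        have hmax : max d (pvGrade r) = pvGrade r := Nat.max_eq_right hgd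
        rw [hmax, ih (pvGrade r) r (grade_le r)]
        refine Prod.ext rfl ?_
        by_cases he : pvGrade r = runM (pvGrade r) t
        · rw [if_pos he]
        · rw [if_neg he]
          rcases runM_attained t (pvGrade r) with h | hex
          · exact absurd h.symm he
          · exact runL_irrel t _ r a hex
      · rw [if_neg hgd]
        have hmax : max d (pvGrade r) = d := Nat.max_eq_left (Nat.le_of_not_le hgd)
        rw [hmax, ih d a hd]
        refine Prod.ext rfl ?_
        have hne : pvGrade r ≠ runM d t := by
          have h1 : d ≤ runM d t := runM_init_le t d
          have h2 : pvGrade r < d := Nat.lt_of_not_le hgd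
          omega
        rw [if_neg hne]

lemma runL_getLast : ∀ (rs : List String) (m : Nat) (a : String),
    (∃ x ∈ rs, pvGrade x = m) →
    runL m a rs = ((rs.filter (fun x => pvGrade x == m)).getLast?).getD "" := by
  intro rs
  induction rs with
  | nil => rintro m a ⟨x, hx, -⟩; cases hx
  | cons y t ih =>
      intro m a hex
      show runL m (if pvGrade y = m then y else a) t = _
      by_cases hy : pvGrade y = m
      · rw [if_pos hy]
        have hfil : (y :: t).filter (fun x => pvGrade x == m)
            = y :: t.filter (fun x => pvGrade x == m) := by
          simp [hy]
        rw [hfil]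
        by_cases hext : ∃ x ∈ t, pvGrade x = m
        · rw [ih m y hext]
          obtain ⟨x, hx, hgx⟩ := hext
          have hmem : x ∈ t.filter (fun x => pvGrade x == m) :=
            List.mem_filter.mpr ⟨hx, by simp [hgx]⟩
          cases hft : t.filter (fun x => pvGrade x == m) with
          | nil => rw [hft] at hmem; cases hmem
          | cons z l => rw [List.getLast?_cons_cons]
        · have hnil : t.filter (fun x => pvGrade x == m) = [] := by
            refine List.filter_eq_nil_iff.mpr ?_
            intro x hx
            simp only [beq_iff_eq]
            exact fun h => hext ⟨x, hx, of_decide_eq_true (by simpa using h)⟩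
          rw [hnil, runL_nomatch t m y (fun x hx h => hext ⟨x, hx, h⟩)]
          rfl
      · rw [if_neg hy]
        have hfil : (y :: t).filter (fun x => pvGrade x == m)
            = t.filter (fun x => pvGrade x == m) := by
          simp [hy]
        rw [hfil]
        refine ih m a ?_
        obtain ⟨x, hx, hgx⟩ := hex
        rcases List.mem_cons.mp hx with rfl | hx'
        · exact absurd hgx hy
        · exact ⟨x, hx', hgx⟩

-- ===== VERDICT (by name: the statement is the Claim_ definition above) =====
theorem assess_issue_severity_spec : Claim_equal_assess_issue_severity := by
  unfold Claim_equal_assess_issue_severity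
  intro reasons _
  unfold Spec_assess_issue_severity
  cases reasons with
  | nil => rfl
  | cons r t =>
      rw [show assess_issue_severity (r :: t)
            = (r :: t).foldl pvStepA (nm 0, "Aucune alerte majeure") from rfl]
      rw [show assess_issue_severity_alt (r :: t)
            = (pvNames.getD ((((r :: t).map (fun x => (pvGrade x, x))).map Prod.fst).foldl max 0) "faible",
               (((((r :: t).map (fun x => (pvGrade x, x))).filter
                   (fun gr => gr.1 == (((r :: t).map (fun x => (pvGrade x, x))).map Prod.fst).foldl max 0)).map
                   Prod.snd).getLast?).getD "") from rfl]
      rw [foldA_char (r :: t) 0 "Aucune alerte majeure" (by omega)]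
      have hbest : (((r :: t).map (fun x => (pvGrade x, x))).map Prod.fst).foldl max 0
          = runM 0 (r :: t) := by
        rw [List.map_map, List.foldl_map]; rfl
      have hsnd : ∀ (l : List String) (M : Nat), (((l.map (fun x => (pvGrade x, x))).filter
              (fun gr => gr.1 == M)).map Prod.snd)
          = l.filter (fun x => pvGrade x == M) := by
        intro l M
        induction l with
        | nil => rfl
        | cons y u ihu =>
            simp only [List.map_cons, List.filter_cons]
            by_cases h : (pvGrade y == M) = true
            · simp [h, ihu]
            · simp [h, ihu]
      have hex : ∃ x ∈ (r :: t), pvGrade x = runM 0 (r :: t) := by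
        rcases runM_attained (r :: t) 0 with h | h
        · refine ⟨r, List.mem_cons_self, ?_⟩
          have := runM_mem_le (r :: t) 0 r List.mem_cons_self
          omega
        · exact h
      rw [hbest, hsnd (r :: t) (runM 0 (r :: t)), runL_getLast (r :: t) (runM 0 (r :: t)) "Aucune alerte majeure" hex]
      rfl
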